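-- pv_equiv track=rewrite | github.com/Cytorres/TAcademy-lista0 | exer_1/src/application/pega_numeros.py | numeros_duplicados2
-- ===== SOURCE A (Python) =====
-- from typing import List
--
-- def numeros_duplicados2(lista_de_numeros:List[int])->List[int]:
--     lista_de_repetidos = []
--     for i in range(len(lista_de_numeros)):
--         for j in range(i+1, len(lista_de_numeros)):
--             if  lista_de_numeros[i] == lista_de_numeros[j]:
--                 lista_de_repetidos.append(lista_de_numeros[i])
--                 break
--
--     return lista_de_repetidos
-- ===== SOURCE B (Python) =====
-- from typing import List
--
-- def numeros_duplicados2(lista_de_numeros: List[int]) -> List[int]: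
--     seen = set()
--     lista_de_repetidos = []
--     for x in reversed(lista_de_numeros):
--         if x in seen:
--             lista_de_repetidos.append(x)
--         seen.add(x)
--     lista_de_repetidos.reverse()
--     return lista_de_repetidos
-- ===== Notes on version B (the rewrite author's own statement) =====
-- stated objective: faster
-- what changed: Replaced the O(n^2) nested index scan (for each i, scan j>i for an equal element) by a single right-to-left pass with a hash set of elements seen so far (an element is kept iff it was already seen to its right), reversing the collected list at the end.
import Mathlib
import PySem

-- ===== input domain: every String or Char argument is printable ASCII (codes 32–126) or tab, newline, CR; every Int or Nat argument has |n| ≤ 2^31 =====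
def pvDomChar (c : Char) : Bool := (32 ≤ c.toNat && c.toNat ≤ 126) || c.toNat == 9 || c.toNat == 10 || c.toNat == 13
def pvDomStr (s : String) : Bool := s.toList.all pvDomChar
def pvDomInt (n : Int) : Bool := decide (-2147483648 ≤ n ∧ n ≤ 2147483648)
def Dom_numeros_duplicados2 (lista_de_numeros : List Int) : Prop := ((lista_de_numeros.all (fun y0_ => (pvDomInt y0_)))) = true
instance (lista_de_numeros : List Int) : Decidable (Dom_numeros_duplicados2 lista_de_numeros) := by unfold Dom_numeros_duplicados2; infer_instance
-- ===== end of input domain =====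

-- B replaces A's O(n^2) nested scan by one right-to-left pass with a seen-set (faster, asymptotic).


-- ===== PORT A =====
-- inner 'for j in range(i+1, n)' with break; both indices produced by range are always in
-- bounds, so pyGetD with default 0 is exact here
def pvInnerA (xs : List Int) (i : Int) (js : List Int) (acc : List Int) : List Int :=
  match js with
  | [] => acc
  | j :: rest =>
    if PySem.List.pyGetD xs i 0 == PySem.List.pyGetD xs j 0 then
      acc ++ [PySem.List.pyGetD xs i 0]
    else pvInnerA xs i rest acc

def numeros_duplicados2 (lista_de_numeros : List Int) : List Int :=
  (PySem.List.pyRange 0 (lista_de_numeros.length : Int) 1).foldl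
    (fun acc i =>
      pvInnerA lista_de_numeros i
        (PySem.List.pyRange (i + 1) (lista_de_numeros.length : Int) 1) acc) []

-- ===== PORT B =====
-- loop body of Source B: state = (seen, lista_de_repetidos)
def pvStepB (st : PySem.Set Int × List Int) (x : Int) : PySem.Set Int × List Int :=
  (PySem.Set.add st.1 x, if PySem.Set.contains st.1 x then st.2 ++ [x] else st.2)

def numeros_duplicados2_alt (lista_de_numeros : List Int) : List Int :=
  ((lista_de_numeros.reverse).foldl pvStepB (PySem.Set.empty, [])).2.reverse

-- ===== PRECONDITION & SPEC =====
def Spec_numeros_duplicados2 (lista_de_numeros : List Int) (out : List Int) : Prop := out = numeros_duplicados2_alt lista_de_numeros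
instance (lista_de_numeros : List Int) (out : List Int) : Decidable (Spec_numeros_duplicados2 lista_de_numeros out) := by unfold Spec_numeros_duplicados2; infer_instance

-- ===== CLAIM (what is proved, stated in full; the proofs are below) =====
def Claim_equal_numeros_duplicados2 : Prop := ∀ (lista_de_numeros : List Int), Dom_numeros_duplicados2 lista_de_numeros → Spec_numeros_duplicados2 lista_de_numeros (numeros_duplicados2 lista_de_numeros)

-- ===== LEMMAS AND PROOFS =====

-- A's break-loop appends x_i exactly when some later index matches
theorem pvInnerA_eq (xs : List Int) (i : Int) (js : List Int) (acc : List Int) :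
    pvInnerA xs i js acc =
      if js.any (fun j => PySem.List.pyGetD xs i 0 == PySem.List.pyGetD xs j 0) then
        acc ++ [PySem.List.pyGetD xs i 0]
      else acc := by
  induction js with
  | nil => simp [pvInnerA]
  | cons j rest ih =>
    simp only [pvInnerA, List.any_cons]
    by_cases h : PySem.List.pyGetD xs i 0 == PySem.List.pyGetD xs j 0
    · simp [h]
    · simp [h, ih]

def pvCondA (xs : List Int) (i : Int) : Bool :=
  (PySem.List.pyRange (i + 1) (xs.length : Int) 1).any
    (fun j => PySem.List.pyGetD xs i 0 == PySem.List.pyGetD xs j 0)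

theorem pvCondA_eq (xs : List Int) (i : Int) (h : 0 ≤ i) :
    pvCondA xs i = decide (PySem.List.pyGetD xs i 0 ∈ xs.drop (i.toNat + 1)) := by
  unfold pvCondA
  have h1 : (0 : Int) ≤ i + 1 := by omega
  have h2 : (i + 1).toNat = i.toNat + 1 := by omega
  rw [show (fun j => PySem.List.pyGetD xs i 0 == PySem.List.pyGetD xs j 0) =
      ((fun v => PySem.List.pyGetD xs i 0 == v) ∘ (fun j => PySem.List.pyGetD xs j 0)) from rfl,
      ← List.any_map, PySem.List.map_pyGetD_pyRange' xs 0 h1, h2]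
  simp [List.any_beq]

theorem numeros_duplicados2_eq_filter_map (xs : List Int) :
    numeros_duplicados2 xs =
      ((PySem.List.pyRange 0 (xs.length : Int) 1).filter (pvCondA xs)).map
        (fun i => PySem.List.pyGetD xs i 0) := by
  unfold numeros_duplicados2
  rw [PySem.List.foldl_congr_mem _ _
        (fun acc i => if pvCondA xs i then acc ++ [PySem.List.pyGetD xs i 0] else acc) []
        (fun acc i _ => by rw [pvInnerA_eq]; rfl)]
  exact PySem.List.foldl_append_if _ _ _ _

theorem numeros_duplicados2_cons (x : Int) (t : List Int) :
    numeros_duplicados2 (x :: t) =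
      (if x ∈ t then [x] else []) ++ numeros_duplicados2 t := by
  rw [numeros_duplicados2_eq_filter_map, numeros_duplicados2_eq_filter_map]
  have hlen : (((x :: t).length : Int)) = (t.length : Int) + 1 := by simp
  rw [hlen, PySem.List.pyRange_one_cons (by omega), show (0 : Int) + 1 = 1 by norm_num]
  rw [List.filter_cons]
  have hc0 : pvCondA (x :: t) 0 = decide (x ∈ t) := by
    rw [pvCondA_eq _ _ le_rfl]
    simp [PySem.List.pyGetD]
  have hget : ∀ k : Nat, PySem.List.pyGetD (x :: t) (1 + (k : Int)) 0 =
      PySem.List.pyGetD t (k : Int) 0 := by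
    intro k
    have h : (1 : Int) + (k : Int) = ((k + 1 : Nat) : Int) := by push_cast; ring
    rw [h, PySem.List.pyGetD_natCast, PySem.List.pyGetD_natCast]
    simp
  have hcond : ∀ k : Nat, pvCondA (x :: t) (1 + (k : Int)) = pvCondA t (k : Int) := by
    intro k
    rw [pvCondA_eq _ _ (by omega), pvCondA_eq _ _ (by omega), hget]
    have h1 : (1 + (k : Int)).toNat + 1 = k + 2 := by omega
    have h2 : ((k : Int)).toNat + 1 = k + 1 := by omega
    rw [h1, h2]
    simp
  have hrange1 : PySem.List.pyRange 1 ((t.length : Int) + 1) 1 =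
      (List.range t.length).map (fun k : Nat => 1 + (k : Int)) := by
    have h : ((t.length : Int) + 1 - 1).toNat = t.length := by omega
    rw [PySem.List.pyRange_one, h]
  have hrange0 : PySem.List.pyRange 0 (t.length : Int) 1 =
      (List.range t.length).map (fun k : Nat => (k : Int)) := by
    have h : ((t.length : Int) - 0).toNat = t.length := by omega
    rw [PySem.List.pyRange_one, h]
    simp
  have htail :
      ((PySem.List.pyRange 1 ((t.length : Int) + 1) 1).filter (pvCondA (x :: t))).map
          (fun i => PySem.List.pyGetD (x :: t) i 0) =
        ((PySem.List.pyRange 0 (t.length : Int) 1).filter (pvCondA t)).map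
          (fun i => PySem.List.pyGetD t i 0) := by
    rw [hrange1, hrange0, List.filter_map, List.filter_map, List.map_map, List.map_map]
    rw [List.filter_congr (fun k _ => by simp only [Function.comp]; exact hcond k)]
    apply List.map_congr_left
    intro k _
    simp only [Function.comp]
    exact hget k
  by_cases hx : x ∈ t
  · simp only [hc0, hx, decide_true, if_true, List.map_cons, htail]
    simp [PySem.List.pyGetD]
  · simp only [hc0, hx, decide_false, if_false, List.nil_append]
    exact htail

-- B-side: the collected (un-reversed) output of the loop, as a structural function
def pvG : List Int → PySem.Set Int → List Int
  | [], _ => []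
  | x :: t, s => (if PySem.Set.contains s x then [x] else []) ++ pvG t (PySem.Set.add s x)

theorem pvFoldB (ys : List Int) (s : PySem.Set Int) (o : List Int) :
    ys.foldl pvStepB (s, o) = (ys.foldl PySem.Set.add s, o ++ pvG ys s) := by
  induction ys generalizing s o with
  | nil => simp [pvG]
  | cons y t ih =>
    simp only [List.foldl_cons, pvStepB, pvG, ih]
    by_cases h : y ∈ s <;> simp [h]

theorem pvContains_foldl_add (ys : List Int) (s : PySem.Set Int) (x : Int) :
    PySem.Set.contains (ys.foldl PySem.Set.add s) x = decide (x ∈ s ∨ x ∈ ys) := by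
  have : ys.foldl PySem.Set.add s = PySem.Set.update s ys := rfl
  rw [this]
  simp [PySem.Set.mem_update]

theorem numeros_duplicados2_alt_cons (x : Int) (t : List Int) :
    numeros_duplicados2_alt (x :: t) =
      (if x ∈ t then [x] else []) ++ numeros_duplicados2_alt t := by
  unfold numeros_duplicados2_alt
  rw [List.reverse_cons, List.foldl_append, pvFoldB, pvFoldB]
  have hx' : PySem.Set.contains (t.reverse.foldl PySem.Set.add PySem.Set.empty) x =
      decide (x ∈ t) := by
    rw [pvContains_foldl_add]
    simp [PySem.Set.empty]
  simp only [pvG, hx', List.nil_append, List.append_nil, List.reverse_append]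
  by_cases hx : x ∈ t
  · simp [hx]
  · simp [hx]

theorem pv_main (xs : List Int) : numeros_duplicados2 xs = numeros_duplicados2_alt xs := by
  induction xs with
  | nil => rfl
  | cons x t ih => rw [numeros_duplicados2_cons, numeros_duplicados2_alt_cons, ih]

-- ===== VERDICT (by name: the statement is the Claim_ definition above) =====
theorem numeros_duplicados2_spec : Claim_equal_numeros_duplicados2 := by
  intro xs _
  unfold Spec_numeros_duplicados2
  exact pv_main xs
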